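-- pv_equiv track=rewrite | github.com/NupurJ/TxGraffiti2 | demo/lean_integer_demo.py | boolean_properties
-- ===== SOURCE A (Python) =====
-- from typing import Dict, List, Tuple
--
-- def prime_factorization(n: int) -> List[Tuple[int, int]]:
--     factors = []
--     d = 2
--     m = n
--     while d * d <= m:
--         if m % d == 0:
--             e = 0
--             while m % d == 0:
--                 m //= d
--                 e += 1
--             factors.append((d, e))
--         d += 1 if d == 2 else 2
--     if m > 1:
--         factors.append((m, 1))
--     return factors
--
-- def boolean_properties(n: int, inv: Dict[str, int]) -> Dict[str, bool]:
--     factors = prime_factorization(n) if n > 1 else []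
--     is_prime = (n > 1) and len(factors) == 1 and factors[0][1] == 1
--     is_squarefree = all(e == 1 for _, e in factors) if n > 1 else False
--
--     omega = inv["omega"]
--     Omega = inv["Omega"]
--     is_almost_squarefree = (Omega - omega == 1) and (not is_squarefree)
--
--     is_7_smooth = all(p <= 7 for p, _ in factors) if n > 1 else False
--
--     return {
--         "n_ge_2": (n >= 2),
--         "prime": is_prime,
--         "squarefree": is_squarefree,
--         "almost_squarefree": is_almost_squarefree,
--         "smooth7": is_7_smooth,
--         # optional dataset-specific:
--         # "twin_friend": ...  (if you compute it)
--     }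
-- ===== SOURCE B (Python) =====
-- def boolean_properties(n, inv):
--     # No factorization: each flag is decided by its own direct number-theoretic test.
--     if n > 1:
--         # prime: no divisor d with 2 <= d, d*d <= n
--         is_prime = True
--         d = 2
--         while d * d <= n:
--             if n % d == 0:
--                 is_prime = False
--                 break
--             d += 1
--         # squarefree: no square d*d (d >= 2) divides n
--         is_squarefree = True
--         d = 2
--         while d * d <= n:
--             if n % (d * d) == 0:
--                 is_squarefree = False
--                 break
--             d += 1
--         # 7-smooth: dividing out 2, 3, 5, 7 leaves 1
--         m = n
--         for p in (2, 3, 5, 7):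
--             while m % p == 0:
--                 m //= p
--         is_7_smooth = (m == 1)
--     else:
--         is_prime = is_squarefree = is_7_smooth = False
--     is_almost_squarefree = (inv["Omega"] - inv["omega"] == 1) and (not is_squarefree)
--     return {
--         "n_ge_2": (n >= 2),
--         "prime": is_prime,
--         "squarefree": is_squarefree,
--         "almost_squarefree": is_almost_squarefree,
--         "smooth7": is_7_smooth,
--     }
-- ===== Notes on version B (the rewrite author's own statement) =====
-- stated objective: alternative
-- what changed: B drops the prime-factorization helper entirely: each flag is computed by its own direct test - primality by a bare trial-divisor scan, squarefreeness by scanning for a square divisor d*d | n, and 7-smoothness by dividing out only 2,3,5,7 and checking the remainder is 1 - instead of building a factor list and scanning it three times.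
import Mathlib
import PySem

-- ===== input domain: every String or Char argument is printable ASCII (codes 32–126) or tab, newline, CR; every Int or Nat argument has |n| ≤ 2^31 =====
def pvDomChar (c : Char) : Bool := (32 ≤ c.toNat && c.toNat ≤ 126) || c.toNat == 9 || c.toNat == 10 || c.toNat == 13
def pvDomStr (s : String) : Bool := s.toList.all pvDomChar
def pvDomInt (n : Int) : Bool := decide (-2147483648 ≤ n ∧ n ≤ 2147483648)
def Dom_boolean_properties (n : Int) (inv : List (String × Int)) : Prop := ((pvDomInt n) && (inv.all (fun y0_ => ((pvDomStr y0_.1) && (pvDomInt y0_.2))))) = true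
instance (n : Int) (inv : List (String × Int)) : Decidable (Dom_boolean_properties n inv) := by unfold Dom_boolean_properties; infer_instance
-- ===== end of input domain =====

-- B computes each flag by its own direct test (trial-divisor primality scan, square-divisor
-- scan for squarefreeness, dividing out only 2,3,5,7 for smoothness) instead of building a
-- prime-factor list and scanning it three times (objective: alternative).

-- ===== PORT A =====

-- A's inner `while m % d == 0: m //= d; e += 1` loop
-- (the extra `2 ≤ d ∧ 0 < m` in the guard only makes the recursion total; the call site satisfies it)

-- small arithmetic facts cited by the termination proofs of the loops below
theorem pv_ediv_lt (m d : Int) (hm : 0 < m) (hd : 2 ≤ d) : m / d < m := by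
  have h0 : 0 ≤ m / d := Int.ediv_nonneg (by omega) (by omega)
  have h1 : m / d * d ≤ m := Int.ediv_mul_le m (by omega : d ≠ 0)
  have h2 : m / d * 2 ≤ m / d * d := mul_le_mul_of_nonneg_left hd h0
  omega

theorem pv_div_dec (m d : Int) (hd : 2 ≤ d) (hm : 0 < m) :
    (PySem.Int.floordiv m d).toNat < m.toNat := by
  rw [PySem.Int.floordiv_eq_ediv_of_pos (by omega)]
  have h1 : m / d < m := pv_ediv_lt m d hm hd
  have h2 : 0 ≤ m / d := Int.ediv_nonneg (by omega) (by omega)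
  omega

theorem sub_dec (m d d' : Int) (hd : 2 ≤ d) (hg : d * d ≤ m) (h' : d < d') :
    (m + 1 - d').toNat < (m + 1 - d).toNat := by
  have h4 : d ≤ d * d := le_mul_of_one_le_left (by omega) (by omega)
  omega

def pyPeel (m d : Int) : Int × Int :=
  if h : 2 ≤ d ∧ 0 < m ∧ PySem.Int.mod m d = 0 then
    let p := pyPeel (PySem.Int.floordiv m d) d
    (p.1, p.2 + 1)
  else (m, 0)
termination_by m.toNat
decreasing_by exact pv_div_dec m d h.1 h.2.1

theorem pyPeel_fst_dvd_pos (m d : Int) (hm : 0 < m) (hd : 2 ≤ d) :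
    0 < (pyPeel m d).1 ∧ (pyPeel m d).1 ∣ m := by
  by_cases hc : PySem.Int.mod m d = 0
  · have hdvd : d ∣ m := (PySem.Int.mod_eq_zero_iff_dvd m d).mp hc
    have hfd : PySem.Int.floordiv m d = m / d := PySem.Int.floordiv_eq_ediv_of_pos (by omega)
    have hdm : d ≤ m := Int.le_of_dvd hm hdvd
    have hq1 : 1 ≤ m / d := (Int.le_ediv_iff_mul_le (by omega)).mpr (by omega)
    have hqd : m / d ∣ m := ⟨d, (Int.ediv_mul_cancel hdvd).symm⟩
    have IH := pyPeel_fst_dvd_pos (m / d) d (by omega) hd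
    have hstep : (pyPeel m d).1 = (pyPeel (m / d) d).1 := by
      rw [pyPeel, dif_pos ⟨hd, hm, hc⟩, hfd]
    rw [hstep]
    exact ⟨IH.1, IH.2.trans hqd⟩
  · have hstep : pyPeel m d = (m, 0) := by rw [pyPeel, dif_neg (by tauto)]
    rw [hstep]; exact ⟨hm, dvd_refl m⟩
termination_by m.toNat
decreasing_by
  have h1 : m / d < m := pv_ediv_lt m d hm hd
  omega

theorem factA_dec1 (m d : Int) (hd : 2 ≤ d) (hm : 0 < m) (hmod : PySem.Int.mod m d = 0) :
    (pyPeel m d).1 < m := by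
  have hdvd : d ∣ m := (PySem.Int.mod_eq_zero_iff_dvd m d).mp hmod
  have hfd : PySem.Int.floordiv m d = m / d := PySem.Int.floordiv_eq_ediv_of_pos (by omega)
  have hdm : d ≤ m := Int.le_of_dvd hm hdvd
  have hq1 : 1 ≤ m / d := (Int.le_ediv_iff_mul_le (by omega)).mpr (by omega)
  have hlt : m / d < m := pv_ediv_lt m d hm hd
  have hstep : (pyPeel m d).1 = (pyPeel (m / d) d).1 := by
    rw [pyPeel, dif_pos ⟨hd, hm, hmod⟩, hfd]
  have h2 := pyPeel_fst_dvd_pos (m / d) d (by omega) hd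
  have hle : (pyPeel (m / d) d).1 ≤ m / d := Int.le_of_dvd (by omega) h2.2
  omega

-- outer `while d * d <= m` loop of A's prime_factorization, plus the trailing `if m > 1`
def factA (m d : Int) : List (Int × Int) :=
  if h : 2 ≤ d ∧ d * d ≤ m then
    if hmod : PySem.Int.mod m d = 0 then
      (d, (pyPeel m d).2) :: factA (pyPeel m d).1 (if d = 2 then d + 1 else d + 2)
    else factA m (if d = 2 then d + 1 else d + 2)
  else if 1 < m then [(m, 1)] else []
termination_by (m.toNat, (m + 1 - d).toNat)
decreasing_by
  · have h4 : d ≤ d * d := le_mul_of_one_le_left (by omega) (by omega)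
    have hlt := factA_dec1 m d h.1 (by omega) hmod
    exact Prod.Lex.left _ _ (by omega)
  · exact Prod.Lex.right _ (sub_dec m d _ h.1 h.2 (by split <;> omega))

def prime_factorization (n : Int) : List (Int × Int) := factA n 2

def boolean_properties (n : Int) (inv : List (String × Int)) : List (String × Bool) :=
  let factors := if 1 < n then prime_factorization n else []
  let is_prime := decide (1 < n) && decide (factors.length = 1) &&
      (match factors with
       | pe :: _ => decide (pe.2 = 1)   -- factors[0][1]; the [] case is cut off by the `and` short-circuit
       | [] => false)
  let is_squarefree := if 1 < n then factors.all (fun pe => decide (pe.2 = 1)) else false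
  let omega := (inv.lookup "omega").getD 0   -- inv["omega"]; KeyError (none) excluded by Pre_
  let bigOmega := (inv.lookup "Omega").getD 0
  let is_almost_squarefree := decide (bigOmega - omega = 1) && !is_squarefree
  let is_7_smooth := if 1 < n then factors.all (fun pe => decide (pe.1 ≤ 7)) else false
  [("n_ge_2", decide (2 ≤ n)), ("prime", is_prime), ("squarefree", is_squarefree),
   ("almost_squarefree", is_almost_squarefree), ("smooth7", is_7_smooth)]

-- ===== PORT B =====

-- B's primality scan: `while d*d <= n: if n % d == 0: is_prime = False; break`
def primeLoop (n d : Int) : Bool :=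
  if h : 2 ≤ d ∧ d * d ≤ n then
    if PySem.Int.mod n d = 0 then false else primeLoop n (d + 1)
  else true
termination_by (n + 1 - d).toNat
decreasing_by exact sub_dec n d (d + 1) h.1 h.2 (by omega)

-- B's square-divisor scan: `while d*d <= n: if n % (d*d) == 0: is_squarefree = False; break`
def sqfreeLoop (n d : Int) : Bool :=
  if h : 2 ≤ d ∧ d * d ≤ n then
    if PySem.Int.mod n (d * d) = 0 then false else sqfreeLoop n (d + 1)
  else true
termination_by (n + 1 - d).toNat
decreasing_by exact sub_dec n d (d + 1) h.1 h.2 (by omega)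

-- B's `while m % p == 0: m //= p` (same guard padding as pyPeel, to make it total)
def stripB (m p : Int) : Int :=
  if h : 2 ≤ p ∧ 0 < m ∧ PySem.Int.mod m p = 0 then stripB (PySem.Int.floordiv m p) p else m
termination_by m.toNat
decreasing_by exact pv_div_dec m p h.1 h.2.1

def boolean_properties_alt (n : Int) (inv : List (String × Int)) : List (String × Bool) :=
  let flags :=
    if 1 < n then
      (primeLoop n 2, sqfreeLoop n 2,
       decide (([(2:Int), 3, 5, 7].foldl stripB n) = 1))   -- the `for p in (2,3,5,7)` loop
    else (false, false, false)
  let is_almost_squarefree :=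
    decide ((inv.lookup "Omega").getD 0 - (inv.lookup "omega").getD 0 = 1) && !flags.2.1
  [("n_ge_2", decide (2 ≤ n)), ("prime", flags.1), ("squarefree", flags.2.1),
   ("almost_squarefree", is_almost_squarefree), ("smooth7", flags.2.2)]

-- ===== PRECONDITION & SPEC =====
-- Pre_ excludes exactly the inputs on which Python A raises KeyError: "omega" or "Omega" missing from inv.
def Pre_boolean_properties (n : Int) (inv : List (String × Int)) : Prop :=
  (inv.lookup "omega").isSome ∧ (inv.lookup "Omega").isSome
instance (n : Int) (inv : List (String × Int)) : Decidable (Pre_boolean_properties n inv) := by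
  unfold Pre_boolean_properties; infer_instance
def pvWitness_boolean_properties : Int × (List (String × Int)) := (12, [("omega", 2), ("Omega", 3)])

def Spec_boolean_properties (n : Int) (inv : List (String × Int)) (out : List (String × Bool)) : Prop := out = boolean_properties_alt n inv
instance (n : Int) (inv : List (String × Int)) (out : List (String × Bool)) : Decidable (Spec_boolean_properties n inv out) := by unfold Spec_boolean_properties; infer_instance

-- ===== CLAIM (what is proved, stated in full; the proofs are below) =====
def Claim_equal_boolean_properties : Prop := ∀ (n : Int) (inv : List (String × Int)), Dom_boolean_properties n inv → Pre_boolean_properties n inv → Spec_boolean_properties n inv (boolean_properties n inv)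


-- ===== LEMMAS AND PROOFS =====

-- facts about the inner loop, used for the outer loop's termination (and the proofs below)
theorem pyPeel_main (m d : Int) (hm : 0 < m) (hd : 2 ≤ d) :
    0 < (pyPeel m d).1 ∧ (pyPeel m d).1 ∣ m ∧ ¬ d ∣ (pyPeel m d).1 ∧ 0 ≤ (pyPeel m d).2 ∧
      (PySem.Int.mod m d = 0 → (pyPeel m d).1 < m ∧ 1 ≤ (pyPeel m d).2) := by
  by_cases hc : PySem.Int.mod m d = 0
  · have hdvd : d ∣ m := (PySem.Int.mod_eq_zero_iff_dvd m d).mp hc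
    have hfd : PySem.Int.floordiv m d = m / d := PySem.Int.floordiv_eq_ediv_of_pos (by omega)
    obtain ⟨q, hq⟩ := hdvd
    have hqv : m / d = q := by rw [hq, Int.mul_ediv_cancel_left _ (by omega : d ≠ 0)]
    have hq_pos : 0 < m / d := by rw [hqv]; nlinarith
    have hq_lt : m / d < m := by nlinarith [hq_pos]
    have hdm : m / d ∣ m := ⟨d, by rw [hqv, hq]; ring⟩
    have IH := pyPeel_main (m / d) d hq_pos hd
    have hstep : pyPeel m d = ((pyPeel (m / d) d).1, (pyPeel (m / d) d).2 + 1) := by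
      rw [pyPeel, dif_pos ⟨hd, hm, hc⟩]; simp [hfd]
    rw [hstep]
    obtain ⟨i1, i2, i3, i4, _⟩ := IH
    exact ⟨i1, dvd_trans i2 hdm, i3, by omega,
      fun _ => ⟨lt_of_le_of_lt (Int.le_of_dvd hq_pos i2) hq_lt, by omega⟩⟩
  · have hstep : pyPeel m d = (m, 0) := by rw [pyPeel, dif_neg (by tauto)]
    rw [hstep]
    exact ⟨hm, dvd_refl m, fun hdd => hc ((PySem.Int.mod_eq_zero_iff_dvd m d).mpr hdd),
      le_refl 0, fun h => absurd h hc⟩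
termination_by m.toNat
decreasing_by omega


-- ---- generic Int prime helpers ----

theorem exists_pos_prime_dvd (k : Int) (hk : 2 ≤ k) : ∃ q : Int, Prime q ∧ 2 ≤ q ∧ q ∣ k := by
  obtain ⟨p, hp, hpd⟩ := Int.exists_prime_and_dvd (n := k) (by omega)
  refine ⟨(p.natAbs : Int), ?_, ?_, ?_⟩
  · rw [Int.prime_iff_natAbs_prime, Int.natAbs_natCast]; exact Int.prime_iff_natAbs_prime.mp hp
  · have := (Int.prime_iff_natAbs_prime.mp hp).two_le; omega
  · exact Int.natAbs_dvd.mpr hpd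

theorem pos_prime_dvd_eq (p q : Int) (hp : Prime p) (hq : Prime q)
    (h2p : 2 ≤ p) (h2q : 2 ≤ q) (h : p ∣ q) : p = q := by
  have hn := (Nat.prime_dvd_prime_iff_eq (Int.prime_iff_natAbs_prime.mp hp)
    (Int.prime_iff_natAbs_prime.mp hq)).mp (Int.natAbs_dvd_natAbs.mpr h)
  omega

theorem int_prime_of_no_sqrt (m : Int) (h1 : 1 < m)
    (h : ∀ k : Int, 2 ≤ k → k * k ≤ m → ¬ k ∣ m) : Prime m := by
  rw [Int.prime_iff_natAbs_prime]
  refine Nat.prime_def_lt.mpr ⟨by omega, ?_⟩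
  intro k hk hkd
  by_contra hk1
  have hk0 : k ≠ 0 := by rintro rfl; simp at hkd; omega
  have hk2 : 2 ≤ k := by omega
  obtain ⟨q, hq⟩ := hkd
  have hq2 : 2 ≤ q := by
    rcases Nat.lt_or_ge q 2 with hlt | hge
    · interval_cases q <;> omega
    · exact hge
  have hdvdk : (k : Int) ∣ m := by
    have : (k : Int) ∣ (m.natAbs : Int) := Int.natCast_dvd_natCast.mpr ⟨q, hq⟩
    rwa [Int.natAbs_of_nonneg (by omega)] at this
  have hdvdq : (q : Int) ∣ m := by
    have : (q : Int) ∣ (m.natAbs : Int) := Int.natCast_dvd_natCast.mpr ⟨k, by rw [hq]; ring⟩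
    rwa [Int.natAbs_of_nonneg (by omega)] at this
  have h0 : ((m.natAbs : Int)) = (k : Int) * (q : Int) := by exact_mod_cast congrArg (Nat.cast (R := Int)) hq
  have hcast : (k : Int) * (q : Int) = m := by
    rw [← h0, Int.natAbs_of_nonneg (by omega)]
  by_cases hle : k ≤ q
  · have hle' : (k : Int) ≤ (q : Int) := by exact_mod_cast hle
    exact h (k : Int) (by omega) (by nlinarith) hdvdk
  · have hle' : (q : Int) ≤ (k : Int) := by omega
    exact h (q : Int) (by omega) (by nlinarith) hdvdq

theorem int_no_small_of_prime (m : Int) (hp : Prime m) (h1 : 1 < m) :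
    ∀ k : Int, 2 ≤ k → k * k ≤ m → ¬ k ∣ m := by
  intro k hk2 hks hkd
  have := (Int.prime_iff_natAbs_prime.mp hp).eq_one_or_self_of_dvd k.natAbs
    (Int.natAbs_dvd_natAbs.mpr hkd)
  have hkm : k = 1 ∨ k = m := by omega
  rcases hkm with rfl | rfl
  · omega
  · nlinarith

theorem int_prime_of_no_lt (d : Int) (hd : 2 ≤ d)
    (h : ∀ k : Int, 2 ≤ k → k < d → ¬ k ∣ d) : Prime d := by
  refine int_prime_of_no_sqrt d (by omega) ?_
  intro k hk2 hks
  exact h k hk2 (by nlinarith)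

-- ---- pyPeel / stripB facts ----

theorem pyPeel_prod (m d : Int) (hm : 0 < m) (hd : 2 ≤ d) :
    m = (pyPeel m d).1 * d ^ (pyPeel m d).2.toNat := by
  by_cases hc : PySem.Int.mod m d = 0
  · have hdvd : d ∣ m := (PySem.Int.mod_eq_zero_iff_dvd m d).mp hc
    have hfd : PySem.Int.floordiv m d = m / d := PySem.Int.floordiv_eq_ediv_of_pos (by omega)
    have hmd : d * (m / d) = m := Int.mul_ediv_cancel' hdvd
    have hq_pos : 0 < m / d := by nlinarith [hmd]
    have IH := pyPeel_prod (m / d) d hq_pos hd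
    have he0 : 0 ≤ (pyPeel (m / d) d).2 := (pyPeel_main (m / d) d hq_pos hd).2.2.2.1
    have hstep : pyPeel m d = ((pyPeel (m / d) d).1, (pyPeel (m / d) d).2 + 1) := by
      rw [pyPeel, dif_pos ⟨hd, hm, hc⟩]; simp [hfd]
    rw [hstep]
    have ht : ((pyPeel (m / d) d).2 + 1).toNat = (pyPeel (m / d) d).2.toNat + 1 := by omega
    simp only [ht, pow_succ]
    nlinarith [IH, hmd]
  · have hstep : pyPeel m d = (m, 0) := by rw [pyPeel, dif_neg (by tauto)]
    rw [hstep]; simp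
termination_by m.toNat
decreasing_by
  have hdvd : d ∣ m := (PySem.Int.mod_eq_zero_iff_dvd m d).mp hc
  have hmd : d * (m / d) = m := Int.mul_ediv_cancel' hdvd
  have h5 : 0 < m / d := by nlinarith
  have h7 : 2 * (m / d) ≤ m := by nlinarith
  omega

theorem stripB_eq (m p : Int) : stripB m p = (pyPeel m p).1 := by
  by_cases hc : 2 ≤ p ∧ 0 < m ∧ PySem.Int.mod m p = 0
  · rw [stripB, dif_pos hc, pyPeel, dif_pos hc]
    exact stripB_eq (PySem.Int.floordiv m p) p
  · rw [stripB, dif_neg hc, pyPeel, dif_neg hc]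
termination_by m.toNat
decreasing_by
  rw [PySem.Int.floordiv_eq_ediv_of_pos (by omega)]
  have h2 : p * (m / p) + m % p = m := Int.mul_ediv_add_emod m p
  have h4 : 0 ≤ m / p := Int.ediv_nonneg (le_of_lt hc.2.1) (by omega)
  have h6 : 2 * (m / p) ≤ m := by nlinarith [hc.1, hc.2.1, Int.emod_nonneg m (by omega : p ≠ 0)]
  omega

theorem strip_facts (m p : Int) (hm : 0 < m) (hp : 2 ≤ p) (hpp : Prime p) :
    0 < stripB m p ∧ stripB m p ∣ m ∧ ¬ p ∣ stripB m p ∧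
      (∀ q : Int, Prime q → 2 ≤ q → q ≠ p → (q ∣ stripB m p ↔ q ∣ m)) := by
  obtain ⟨h1, h2, h3, _, _⟩ := pyPeel_main m p hm hp
  have hprod := pyPeel_prod m p hm hp
  rw [stripB_eq]
  refine ⟨h1, h2, h3, ?_⟩
  intro q hq h2q hqp
  constructor
  · exact fun h => h.trans h2
  · intro hqm
    rw [hprod] at hqm
    rcases (Prime.dvd_mul hq).mp hqm with h | h
    · exact h
    · exact absurd (pos_prime_dvd_eq q p hq hpp h2q hp (hq.dvd_of_dvd_pow h)) hqp

-- ---- characterization of A's factor list ----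

def goodList (m d : Int) (L : List (Int × Int)) : Prop :=
  (∀ pe ∈ L, Prime pe.1 ∧ d ≤ pe.1 ∧ 1 ≤ pe.2) ∧
  (L.map Prod.fst).Pairwise (· < ·) ∧
  m = (L.map (fun pe => pe.1 ^ pe.2.toNat)).prod

theorem factA_good (m d : Int) (hm : 0 < m) (hd : 2 ≤ d)
    (hinv : ∀ k, 2 ≤ k → k < d → ¬ k ∣ m) (hpar : d = 2 ∨ ¬ (2:Int) ∣ d) :
    goodList m d (factA m d) := by
  by_cases hg : d * d ≤ m
  · have hdm : d ≤ m := by nlinarith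
    by_cases hmod : PySem.Int.mod m d = 0
    · have hdvd : d ∣ m := (PySem.Int.mod_eq_zero_iff_dvd m d).mp hmod
      have hdp : Prime d :=
        int_prime_of_no_lt d hd (fun k hk2 hkd hkdvd => hinv k hk2 hkd (hkdvd.trans hdvd))
      obtain ⟨hr_pos, hr_dvd, hr_nd, he0, hlt1⟩ := pyPeel_main m d hm hd
      have he1 : 1 ≤ (pyPeel m d).2 := (hlt1 hmod).2
      have hprod := pyPeel_prod m d hm hd
      have hd'2 : 2 ≤ (if d = 2 then d + 1 else d + 2) ∧ d < (if d = 2 then d + 1 else d + 2) := by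
        split <;> omega
      have hinv' : ∀ k, 2 ≤ k → k < (if d = 2 then d + 1 else d + 2) → ¬ k ∣ (pyPeel m d).1 := by
        intro k hk2 hkd' hkr
        rcases lt_trichotomy k d with hlt | heq | hgt
        · exact hinv k hk2 hlt (hkr.trans hr_dvd)
        · exact hr_nd (heq ▸ hkr)
        · have hdne : d ≠ 2 := by
            rintro rfl; rw [if_pos rfl] at hkd'; omega
          rw [if_neg hdne] at hkd'
          have hdodd : ¬ (2:Int) ∣ d := by
            rcases hpar with h2 | h2
            · exact absurd h2 hdne
            · exact h2
          have h2k : (2:Int) ∣ k := by omega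
          have h2m : ¬ (2:Int) ∣ m := hinv 2 (by omega) (by omega)
          exact h2m ((h2k.trans hkr).trans hr_dvd)
      have hpar' : (if d = 2 then d + 1 else d + 2) = 2 ∨ ¬ (2:Int) ∣ (if d = 2 then d + 1 else d + 2) := by
        right
        rcases hpar with h2 | h2
        · subst h2; rw [if_pos rfl]; omega
        · have hdne : d ≠ 2 := by rintro rfl; exact h2 (dvd_refl 2)
          rw [if_neg hdne]; omega
      obtain ⟨g1, g2, g3⟩ := factA_good (pyPeel m d).1 (if d = 2 then d + 1 else d + 2)
        hr_pos hd'2.1 hinv' hpar'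
      rw [factA, dif_pos ⟨hd, hg⟩, dif_pos hmod]
      refine ⟨?_, ?_, ?_⟩
      · intro pe hpe
        rcases List.mem_cons.mp hpe with rfl | hmem
        · exact ⟨hdp, le_refl d, he1⟩
        · obtain ⟨q1, q2, q3⟩ := g1 pe hmem
          exact ⟨q1, by omega, q3⟩
      · rw [List.map_cons]
        refine List.Pairwise.cons ?_ g2
        intro b hb
        obtain ⟨pe, hpe, rfl⟩ := List.mem_map.mp hb
        obtain ⟨_, q2, _⟩ := g1 pe hpe
        omega
      · rw [List.map_cons, List.prod_cons, ← g3]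
        conv_lhs => rw [hprod]
        ring
    · have hinv' : ∀ k, 2 ≤ k → k < (if d = 2 then d + 1 else d + 2) → ¬ k ∣ m := by
        intro k hk2 hkd' hkm
        rcases lt_trichotomy k d with hlt | heq | hgt
        · exact hinv k hk2 hlt hkm
        · exact hmod ((PySem.Int.mod_eq_zero_iff_dvd m d).mpr (heq ▸ hkm))
        · have hdne : d ≠ 2 := by
            rintro rfl; rw [if_pos rfl] at hkd'; omega
          rw [if_neg hdne] at hkd'
          have hdodd : ¬ (2:Int) ∣ d := by
            rcases hpar with h2 | h2
            · exact absurd h2 hdne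
            · exact h2
          have h2k : (2:Int) ∣ k := by omega
          exact hinv 2 (by omega) (by omega) (h2k.trans hkm)
      have hpar' : (if d = 2 then d + 1 else d + 2) = 2 ∨ ¬ (2:Int) ∣ (if d = 2 then d + 1 else d + 2) := by
        right
        rcases hpar with h2 | h2
        · subst h2; rw [if_pos rfl]; omega
        · have hdne : d ≠ 2 := by rintro rfl; exact h2 (dvd_refl 2)
          rw [if_neg hdne]; omega
      have hd'2 : 2 ≤ (if d = 2 then d + 1 else d + 2) := by split <;> omega
      obtain ⟨g1, g2, g3⟩ := factA_good m (if d = 2 then d + 1 else d + 2) hm hd'2 hinv' hpar'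
      rw [factA, dif_pos ⟨hd, hg⟩, dif_neg hmod]
      refine ⟨?_, g2, g3⟩
      intro pe hpe
      obtain ⟨q1, q2, q3⟩ := g1 pe hpe
      refine ⟨q1, ?_, q3⟩
      have : d < (if d = 2 then d + 1 else d + 2) := by split <;> omega
      omega
  · rw [factA, dif_neg (fun hh => hg hh.2)]
    by_cases h1 : 1 < m
    · rw [if_pos h1]
      have hmp : Prime m := by
        refine int_prime_of_no_sqrt m h1 ?_
        intro k hk2 hks
        exact hinv k hk2 (by nlinarith)
      refine ⟨?_, ?_, ?_⟩
      · intro pe hpe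
        rcases List.mem_cons.mp hpe with rfl | hmem
        · refine ⟨hmp, ?_, by norm_num⟩
          by_contra hdm
          exact hinv m (by omega) (by omega) (dvd_refl m)
        · simp at hmem
      · simp
      · simp
    · rw [if_neg h1]
      refine ⟨by simp, by simp, ?_⟩
      simp; omega
termination_by (m.toNat, (m + 1 - d).toNat)
decreasing_by
  · obtain ⟨_, _, _, _, h4⟩ := pyPeel_main m d hm hd
    obtain ⟨hlt, _⟩ := h4 hmod
    exact Prod.Lex.left _ _ (by omega)
  · have hdm : d ≤ m := by nlinarith
    exact Prod.Lex.right _ (by split <;> omega)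

-- product of the pe.1 ^ pe.2 terms is ≥ 1, and ≥ 2 when the list is nonempty
theorem prodPE_two_le (L : List (Int × Int)) (h : ∀ pe ∈ L, 2 ≤ pe.1 ∧ 1 ≤ pe.2) :
    1 ≤ (L.map (fun pe => pe.1 ^ pe.2.toNat)).prod ∧
      (L ≠ [] → 2 ≤ (L.map (fun pe => pe.1 ^ pe.2.toNat)).prod) := by
  induction L with
  | nil => simp
  | cons pe t ih =>
      obtain ⟨h1, h2⟩ := h pe (List.mem_cons_self ..)
      obtain ⟨ih1, _⟩ := ih (fun x hx => h x (List.mem_cons_of_mem _ hx))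
      have hhead : 2 ≤ pe.1 ^ pe.2.toNat :=
        le_trans h1 (le_self_pow₀ (by omega) (by omega))
      rw [List.map_cons, List.prod_cons]
      constructor
      · nlinarith
      · intro _; nlinarith

-- a square of a positive prime never divides a product of strictly increasing positive primes
theorem no_sq_dvd_prod_primes (P : List Int) (hP : ∀ p ∈ P, Prime p ∧ 2 ≤ p)
    (hnd : P.Pairwise (· < ·)) (q : Int) (hq : Prime q) (h2 : 2 ≤ q) : ¬ q ^ 2 ∣ P.prod := by
  induction P with
  | nil =>
      intro hdvd
      rw [List.prod_nil] at hdvd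
      have := Int.le_of_dvd one_pos hdvd
      nlinarith
  | cons p t ih =>
      intro hdvd
      rw [List.prod_cons] at hdvd
      obtain ⟨hp, h2p⟩ := hP p (List.mem_cons_self ..)
      by_cases hqp : q = p
      · subst hqp
        have hq0 : q ≠ 0 := by omega
        have hqt : q ∣ t.prod := by
          have : q * q ∣ q * t.prod := by rwa [pow_two] at hdvd
          exact (mul_dvd_mul_iff_left hq0).mp this
        obtain ⟨a, ha, hqa⟩ := (Prime.dvd_prod_iff hq).mp hqt
        obtain ⟨hap, h2a⟩ := hP a (List.mem_cons_of_mem _ ha)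
        have : q = a := pos_prime_dvd_eq q a hq hap h2 h2a hqa
        have := (List.pairwise_cons.mp hnd).1 a ha
        omega
      · have hnqp : ¬ q ∣ p := by
          intro hd
          exact hqp (pos_prime_dvd_eq q p hq hp h2 h2p hd)
        have := Prime.pow_dvd_of_dvd_mul_left hq 2 hnqp hdvd
        exact ih (fun x hx => hP x (List.mem_cons_of_mem _ hx)) (List.Pairwise.of_cons hnd) this

-- ---- B's scanning loops, as predicates ----

theorem primeLoop_iff (n d : Int) (hd : 2 ≤ d) :
    primeLoop n d = true ↔ ∀ k, d ≤ k → k * k ≤ n → ¬ k ∣ n := by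
  by_cases hg : d * d ≤ n
  · by_cases hmod : PySem.Int.mod n d = 0
    · rw [primeLoop, dif_pos ⟨hd, hg⟩, if_pos hmod]
      refine ⟨fun h => by simp at h,
        fun hall => ((hall d le_rfl hg) ((PySem.Int.mod_eq_zero_iff_dvd n d).mp hmod)).elim⟩
    · rw [primeLoop, dif_pos ⟨hd, hg⟩, if_neg hmod]
      rw [primeLoop_iff n (d + 1) (by omega)]
      constructor
      · intro hall k hk hks hkd
        rcases eq_or_lt_of_le hk with rfl | hlt
        · exact hmod ((PySem.Int.mod_eq_zero_iff_dvd n _).mpr hkd)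
        · exact hall k (by omega) hks hkd
      · intro hall k hk hks
        exact hall k (by omega) hks
  · rw [primeLoop, dif_neg (fun hh => hg hh.2)]
    refine ⟨fun _ k hk hks hkd => by nlinarith, fun _ => rfl⟩
termination_by (n + 1 - d).toNat
decreasing_by
  have : d ≤ d * d := by nlinarith
  omega

theorem sqfreeLoop_iff (n d : Int) (hd : 2 ≤ d) :
    sqfreeLoop n d = true ↔ ∀ k, d ≤ k → k * k ≤ n → ¬ k * k ∣ n := by
  by_cases hg : d * d ≤ n
  · by_cases hmod : PySem.Int.mod n (d * d) = 0
    · rw [sqfreeLoop, dif_pos ⟨hd, hg⟩, if_pos hmod]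
      refine ⟨fun h => by simp at h,
        fun hall => ((hall d le_rfl hg) ((PySem.Int.mod_eq_zero_iff_dvd n (d * d)).mp hmod)).elim⟩
    · rw [sqfreeLoop, dif_pos ⟨hd, hg⟩, if_neg hmod]
      rw [sqfreeLoop_iff n (d + 1) (by omega)]
      constructor
      · intro hall k hk hks hkd
        rcases eq_or_lt_of_le hk with rfl | hlt
        · exact hmod ((PySem.Int.mod_eq_zero_iff_dvd n _).mpr hkd)
        · exact hall k (by omega) hks hkd
      · intro hall k hk hks
        exact hall k (by omega) hks
  · rw [sqfreeLoop, dif_neg (fun hh => hg hh.2)]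
    refine ⟨fun _ k hk hks hkd => by nlinarith, fun _ => rfl⟩
termination_by (n + 1 - d).toNat
decreasing_by
  have : d ≤ d * d := by nlinarith
  omega

-- ---- the three flag equalities ----

theorem sf_eq (n : Int) (L : List (Int × Int)) (hn : 1 < n) (hg : goodList n 2 L) :
    L.all (fun pe => decide (pe.2 = 1)) = sqfreeLoop n 2 := by
  obtain ⟨g1, g2, g3⟩ := hg
  rw [Bool.eq_iff_iff, List.all_eq_true, sqfreeLoop_iff n 2 (by omega)]
  constructor
  · intro hall k hk2 hks hkd
    have hmap : L.map (fun pe => pe.1 ^ pe.2.toNat) = L.map Prod.fst := by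
      apply List.map_congr_left
      intro pe hpe
      have he : pe.2 = 1 := by simpa using hall pe hpe
      rw [he]; norm_num
    obtain ⟨q, hq, h2q, hqk⟩ := exists_pos_prime_dvd k hk2
    have hq2 : q ^ 2 ∣ n := dvd_trans (by rw [pow_two]; exact mul_dvd_mul hqk hqk) hkd
    rw [g3, hmap] at hq2
    refine no_sq_dvd_prod_primes (L.map Prod.fst) ?_ g2 q hq h2q hq2
    intro p hp
    obtain ⟨pe, hpe, rfl⟩ := List.mem_map.mp hp
    obtain ⟨a1, a2, _⟩ := g1 pe hpe
    exact ⟨a1, a2⟩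
  · intro hall pe hpe
    obtain ⟨a1, a2, a3⟩ := g1 pe hpe
    simp only [decide_eq_true_eq]
    by_contra hne
    have he2 : 2 ≤ pe.2.toNat := by omega
    have hdvd : pe.1 ^ pe.2.toNat ∣ n := by
      rw [g3]; exact List.dvd_prod (List.mem_map.mpr ⟨pe, hpe, rfl⟩)
    have hsq : pe.1 * pe.1 ∣ n := dvd_trans (by rw [← pow_two]; exact pow_dvd_pow _ he2) hdvd
    have hle : pe.1 * pe.1 ≤ n := Int.le_of_dvd (by omega) hsq
    exact hall pe.1 a2 hle hsq

theorem prime_eq (n : Int) (L : List (Int × Int)) (hn : 1 < n) :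
    goodList n 2 L →
    (decide (L.length = 1) && (match L with | pe :: _ => decide (pe.2 = 1) | [] => false))
      = primeLoop n 2 := by
  intro hg
  obtain ⟨g1, g2, g3⟩ := hg
  have hBP : primeLoop n 2 = true ↔ Prime n := by
    rw [primeLoop_iff n 2 (by omega)]
    constructor
    · intro h; exact int_prime_of_no_sqrt n hn h
    · intro hp; exact int_no_small_of_prime n hp hn
  rcases L with _ | ⟨pe1, t⟩
  · simp at g3; omega
  rcases t with _ | ⟨pe2, t⟩
  · obtain ⟨a1, a2, a3⟩ := g1 pe1 (List.mem_cons_self ..)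
    have hg3 : n = pe1.1 ^ pe1.2.toNat := by simpa using g3
    have hAiff : pe1.2 = 1 ↔ Prime n := by
      constructor
      · intro he
        rw [hg3, he]; norm_num; exact a1
      · intro hp
        by_contra hne
        have ht2 : 2 ≤ pe1.2.toNat := by omega
        have hsplit : n = pe1.1 * pe1.1 ^ (pe1.2.toNat - 1) := by
          rw [hg3]
          conv_lhs => rw [show pe1.2.toNat = 1 + (pe1.2.toNat - 1) by omega]
          rw [pow_add, pow_one]
        have h2p : 2 ≤ pe1.1 := a2
        have h2q : 2 ≤ pe1.1 ^ (pe1.2.toNat - 1) :=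
          le_trans h2p (le_self_pow₀ (by omega) (by omega))
        rcases hp.irreducible.isUnit_or_isUnit hsplit with hu | hu <;>
          rw [Int.isUnit_iff] at hu <;> omega
    rw [Bool.eq_iff_iff, Bool.and_eq_true]
    constructor
    · rintro ⟨_, h⟩
      exact hBP.mpr (hAiff.mp (by simpa using h))
    · intro h
      exact ⟨by simp, by simpa using hAiff.mpr (hBP.mp h)⟩
  · have hlen : ((pe1 :: pe2 :: t).length = 1) = False := by simp
    have hnp : ¬ Prime n := by
      have hsplit : n = pe1.1 ^ pe1.2.toNat * ((pe2 :: t).map (fun pe => pe.1 ^ pe.2.toNat)).prod := by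
        simpa using g3
      have h2a : 2 ≤ pe1.1 ^ pe1.2.toNat := by
        obtain ⟨a1, a2, a3⟩ := g1 pe1 (List.mem_cons_self ..)
        exact le_trans a2 (le_self_pow₀ (by omega) (by omega))
      have h2b : 2 ≤ ((pe2 :: t).map (fun pe => pe.1 ^ pe.2.toNat)).prod := by
        refine (prodPE_two_le (pe2 :: t) ?_).2 (by simp)
        intro pe hpe
        obtain ⟨a1, a2, a3⟩ := g1 pe (List.mem_cons_of_mem _ hpe)
        exact ⟨a2, a3⟩
      intro hp
      rcases hp.irreducible.isUnit_or_isUnit hsplit with hu | hu <;>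
        rw [Int.isUnit_iff] at hu <;> omega
    cases hb : primeLoop n 2
    · simp
    · exact absurd (hBP.mp hb) hnp

theorem smooth_eq (n : Int) (L : List (Int × Int)) (hn : 1 < n) (hg : goodList n 2 L) :
    L.all (fun pe => decide (pe.1 ≤ 7)) = decide (([(2:Int), 3, 5, 7].foldl stripB n) = 1) := by
  obtain ⟨g1, g2, g3⟩ := hg
  have hn0 : 0 < n := by omega
  have hp2 : Prime (2:Int) := by norm_num
  have hp3 : Prime (3:Int) := by norm_num
  have hp5 : Prime (5:Int) := by norm_num
  have hp7 : Prime (7:Int) := by norm_num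
  obtain ⟨P2, D2, N2, I2⟩ := strip_facts n 2 hn0 (by norm_num) hp2
  obtain ⟨P3, D3, N3, I3⟩ := strip_facts (stripB n 2) 3 P2 (by norm_num) hp3
  obtain ⟨P5, D5, N5, I5⟩ := strip_facts (stripB (stripB n 2) 3) 5 P3 (by norm_num) hp5
  obtain ⟨P7, D7, N7, I7⟩ := strip_facts (stripB (stripB (stripB n 2) 3) 5) 7 P5 (by norm_num) hp7
  have hfold : ([(2:Int), 3, 5, 7].foldl stripB n) = stripB (stripB (stripB (stripB n 2) 3) 5) 7 := by
    simp [List.foldl]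
  rw [Bool.eq_iff_iff, List.all_eq_true, hfold]
  simp only [decide_eq_true_eq]
  constructor
  · -- all listed primes ≤ 7  →  stripping 2,3,5,7 leaves 1
    intro hall
    by_contra hr
    have hr2 : 2 ≤ stripB (stripB (stripB (stripB n 2) 3) 5) 7 := by
      rcases Int.lt_or_le 1 (stripB (stripB (stripB (stripB n 2) 3) 5) 7) with h | h
      · omega
      · omega
    obtain ⟨q, hq, h2q, hqr⟩ := exists_pos_prime_dvd _ hr2
    have hqn : q ∣ n := ((D7.trans D5).trans D3).trans D2 |> (fun hd => (hqr.trans hd))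
    have hq7 : q ≤ 7 := by
      rw [g3] at hqn
      obtain ⟨a, ha, hqa⟩ := (Prime.dvd_prod_iff hq).mp hqn
      obtain ⟨pe, hpe, rfl⟩ := List.mem_map.mp ha
      obtain ⟨a1, a2, _⟩ := g1 pe hpe
      have := pos_prime_dvd_eq q pe.1 hq a1 h2q a2 (hq.dvd_of_dvd_pow hqa)
      have h7 : pe.1 ≤ 7 := by simpa using hall pe hpe
      omega
    have hq4 : q ≠ 4 := by rintro rfl; exact (by norm_num : ¬ Prime (4:Int)) hq
    have hq6 : q ≠ 6 := by rintro rfl; exact (by norm_num : ¬ Prime (6:Int)) hq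
    have : q = 2 ∨ q = 3 ∨ q = 5 ∨ q = 7 := by omega
    rcases this with rfl | rfl | rfl | rfl
    · exact N2 ((hqr.trans D7).trans (D5.trans D3))
    · exact N3 (hqr.trans (D7.trans D5))
    · exact N5 (hqr.trans D7)
    · exact N7 hqr
  · -- stripping 2,3,5,7 leaves 1  →  all listed primes ≤ 7
    intro hr pe hpe
    obtain ⟨a1, a2, a3⟩ := g1 pe hpe
    by_contra h7
    have hpn : pe.1 ∣ n := by
      rw [g3]
      exact dvd_trans (dvd_pow_self pe.1 (by omega)) (List.dvd_prod (List.mem_map.mpr ⟨pe, hpe, rfl⟩))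
    have h1 : pe.1 ∣ stripB n 2 := (I2 pe.1 a1 a2 (by omega)).mpr hpn
    have h2 : pe.1 ∣ stripB (stripB n 2) 3 := (I3 pe.1 a1 a2 (by omega)).mpr h1
    have h3 : pe.1 ∣ stripB (stripB (stripB n 2) 3) 5 := (I5 pe.1 a1 a2 (by omega)).mpr h2
    have h4 : pe.1 ∣ stripB (stripB (stripB (stripB n 2) 3) 5) 7 := (I7 pe.1 a1 a2 (by omega)).mpr h3
    rw [hr] at h4
    have := Int.le_of_dvd one_pos h4
    omega

-- ===== VERDICT (by name: the statement is the Claim_ definition above) =====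
theorem boolean_properties_spec : Claim_equal_boolean_properties := by
  intro n inv hdom hpre
  unfold Spec_boolean_properties
  by_cases hn : 1 < n
  · have G := factA_good n 2 (by omega) le_rfl (by intro k hk hk2; omega) (Or.inl rfl)
    have h1 := prime_eq n (factA n 2) hn G
    have h2 := sf_eq n (factA n 2) hn G
    have h3 := smooth_eq n (factA n 2) hn G
    simp only [boolean_properties, boolean_properties_alt, prime_factorization, hn,
      decide_true, Bool.true_and, if_true, h1, h2, h3]
  · simp [boolean_properties, boolean_properties_alt, hn]
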